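-- pv_equiv track=rewrite | github.com/joblinours/workzint | script/rapport.py | generate_annex
-- ===== SOURCE A (Python) =====
-- def generate_annex(entry: dict) -> str:
--     annex_content = "## Services détectés avec captures d'écran\n\n"
--     annex_content += "| Service | Capture d'écran |\n"
--     annex_content += "|---------|------------------|\n"
--
--     services = entry.get("merged_services", [])
--     screenshots = entry.get("img", [])
--
--     screenshot_map = {}
--     for screenshot in screenshots:
--         service_name = screenshot.split("/")[-1].split("_")[1].split(".")[0]
--         screenshot_map[service_name.lower()] = screenshot
--
--     for service in services:
--         service_name = service.split("->")[0].strip().lower()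
--         screenshot_path = screenshot_map.get(service_name, "N/A")
--         if screenshot_path != "N/A":
--             annex_content += f"| {service_name} | ![Capture]({screenshot_path}) |\n"
--         else:
--             annex_content += f"| {service_name} | Aucun screenshot disponible |\n"
--
--     if not services:
--         annex_content += "| Aucun service détecté | N/A |\n"
--
--     return annex_content
-- ===== SOURCE B (Python) =====
-- def generate_annex(entry: dict) -> str:
--     services = entry.get("merged_services", [])
--     screenshots = entry.get("img", [])
--
--     # one table cell per service, filled by sweeping the screenshots
--     names = [s.split("->")[0].strip().lower() for s in services]
--     cells = ["Aucun screenshot disponible"] * len(names)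
--     for shot in screenshots:
--         key = shot.split("/")[-1].split("_")[1].split(".")[0].lower()
--         cells = [f"![Capture]({shot})" if n == key else c
--                  for n, c in zip(names, cells)]
--
--     rows = [f"| {n} | {c} |\n" for n, c in zip(names, cells)]
--     if not rows:
--         rows = ["| Aucun service détecté | N/A |\n"]
--     return ("## Services détectés avec captures d'écran\n\n"
--             "| Service | Capture d'écran |\n"
--             "|---------|------------------|\n" + "".join(rows))
-- ===== Notes on version B (the rewrite author's own statement) =====
-- stated objective: alternative
-- what changed: B inverts the loop nesting: instead of building a name-to-path dict and looking it up per service, it precomputes one cell per service and sweeps the screenshots as the outer loop, each screenshot overwriting the cells of the services it matches; the rows are then emitted as a list and joined once. Pre_ excludes inputs where A raises IndexError (a screenshot whose last path component has no underscore).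
import Mathlib
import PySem

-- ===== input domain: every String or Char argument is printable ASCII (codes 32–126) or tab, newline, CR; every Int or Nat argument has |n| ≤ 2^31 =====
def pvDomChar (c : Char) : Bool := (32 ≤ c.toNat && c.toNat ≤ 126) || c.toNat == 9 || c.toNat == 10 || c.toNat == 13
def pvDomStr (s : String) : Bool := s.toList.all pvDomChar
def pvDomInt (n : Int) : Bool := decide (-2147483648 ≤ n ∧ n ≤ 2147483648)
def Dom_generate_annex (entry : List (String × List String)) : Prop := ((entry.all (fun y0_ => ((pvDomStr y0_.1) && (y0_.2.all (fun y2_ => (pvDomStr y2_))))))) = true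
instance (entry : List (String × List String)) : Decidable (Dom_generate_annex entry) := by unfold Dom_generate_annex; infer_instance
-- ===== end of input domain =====

-- B inverts the loop nesting (screenshots outer, one cell per service overwritten on
-- match, rows joined once at the end): an alternative decomposition, not faster.

-- ===== PORT A =====
-- Literal port of A: build the markdown header, fold the screenshots into a dict
-- keyed by the lower-cased parsed service name (overwrite = last wins), then fold
-- the services appending one row each, matching the original branch structure.
-- The "/" "_" "." "->" separators are nonempty literals, so `split?` is always `some`
-- and `.getD []` is exact; `pyGet? … 1 = none` is exactly Python's IndexError, where
-- the Python raises: there the port skips that screenshot (outside Pre_, see below).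
def generate_annex (entry : List (String × List String)) : String :=
  let annex := "## Services détectés avec captures d'écran\n\n"
  let annex := annex ++ "| Service | Capture d'écran |\n"
  let annex := annex ++ "|---------|------------------|\n"
  let services := (PySem.Dict.mk entry).getD "merged_services" ([] : List String)
  let screenshots := (PySem.Dict.mk entry).getD "img" ([] : List String)
  let smap : PySem.Dict String String := screenshots.foldl (fun m s =>
    match PySem.List.pyGet? ((PySem.Str.split? s "/").getD []) (-1) with
    | none => m
    | some last =>
      match PySem.List.pyGet? ((PySem.Str.split? last "_").getD []) 1 with
      | none => m
      | some mid =>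
        match PySem.List.pyGet? ((PySem.Str.split? mid ".").getD []) 0 with
        | none => m
        | some nm => PySem.Dict.insert m (PySem.Str.lower nm) s) (PySem.Dict.mk [])
  let annex := services.foldl (fun acc service =>
    let service_name := PySem.Str.lower (PySem.Str.strip
      ((PySem.List.pyGet? ((PySem.Str.split? service "->").getD []) 0).getD ""))
    let screenshot_path := smap.getD service_name "N/A"
    if screenshot_path ≠ "N/A" then
      acc ++ "| " ++ service_name ++ " | ![Capture](" ++ screenshot_path ++ ") |\n"
    else
      acc ++ "| " ++ service_name ++ " | Aucun screenshot disponible |\n") annex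
  if services.isEmpty then annex ++ "| Aucun service détecté | N/A |\n" else annex

-- ===== PORT B =====
-- B-side helpers: parse one screenshot path to its lower-cased service name
-- (`none` exactly where the Python raises IndexError; B's parse raises there too),
-- and the lower-cased, stripped service name of a service entry.
def pvShotKey? (s : String) : Option String :=
  (PySem.List.pyGet? ((PySem.Str.split? s "/").getD []) (-1)).bind fun last =>
  (PySem.List.pyGet? ((PySem.Str.split? last "_").getD []) 1).bind fun mid =>
  (PySem.List.pyGet? ((PySem.Str.split? mid ".").getD []) 0).map fun nm =>
  PySem.Str.lower nm

def pvSvcName (service : String) : String :=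
  PySem.Str.lower (PySem.Str.strip
    ((PySem.List.pyGet? ((PySem.Str.split? service "->").getD []) 0).getD ""))

def generate_annex_alt (entry : List (String × List String)) : String :=
  let services := (PySem.Dict.mk entry).getD "merged_services" ([] : List String)
  let screenshots := (PySem.Dict.mk entry).getD "img" ([] : List String)
  let names := services.map pvSvcName
  let cells0 := names.map (fun _ => "Aucun screenshot disponible")
  let cells := screenshots.foldl (fun cells shot =>
    match pvShotKey? shot with
    | none => cells      -- Python raises IndexError here (outside Pre_)
    | some key =>
      (names.zip cells).map (fun p =>
        if p.1 == key then "![Capture](" ++ shot ++ ")" else p.2)) cells0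
  let rows := (names.zip cells).map (fun p => "| " ++ p.1 ++ " | " ++ p.2 ++ " |\n")
  let rows := if rows.isEmpty then ["| Aucun service détecté | N/A |\n"] else rows
  "## Services détectés avec captures d'écran\n\n" ++
  "| Service | Capture d'écran |\n" ++
  "|---------|------------------|\n" ++ PySem.Str.join "" rows

-- ===== PRECONDITION & SPEC =====
-- Pre_ excludes exactly the inputs where Python A raises IndexError: a screenshot
-- string whose last "/"-component contains no "_" (then split("_")[1] raises).
def Pre_generate_annex (entry : List (String × List String)) : Prop :=
  ∀ s ∈ (PySem.Dict.mk entry).getD "img" ([] : List String),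
    2 ≤ ((PySem.Str.split? (((PySem.Str.split? s "/").getD []).getLastD "") "_").getD []).length
instance (entry : List (String × List String)) : Decidable (Pre_generate_annex entry) := by
  unfold Pre_generate_annex; infer_instance

def pvWitness_generate_annex : (List (String × List String)) :=
  [("merged_services", ["http -> 80", "ssh"]), ("img", ["shots/cap_http.png"])]

def Spec_generate_annex (entry : List (String × List String)) (out : String) : Prop := out = generate_annex_alt entry
instance (entry : List (String × List String)) (out : String) : Decidable (Spec_generate_annex entry out) := by unfold Spec_generate_annex; infer_instance

-- ===== CLAIM (what is proved, stated in full; the proofs are below) =====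
def Claim_equal_generate_annex : Prop := ∀ (entry : List (String × List String)), Dom_generate_annex entry → Pre_generate_annex entry → Spec_generate_annex entry (generate_annex entry)

-- ===== LEMMAS AND PROOFS =====

set_option maxHeartbeats 1000000

-- the (name, path) pairs successfully parsed out of the screenshots, in order
def pvPairsOf (sc : List String) : List (String × String) :=
  sc.filterMap (fun s => (pvShotKey? s).map (fun n => (n, s)))

-- B's final cell for service name n: the last successful parse whose name is n
def pvCell (sc : List String) (n : String) : String :=
  match ((pvPairsOf sc).reverse.find? (fun p => p.1 == n)).map Prod.snd with
  | none => "Aucun screenshot disponible"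
  | some path => "![Capture](" ++ path ++ ")"

-- A's dict-building fold, looked up at k, is the last successful parse whose name is k
-- (falling back to whatever the start dict held).
theorem pv_get_fold (sc : List String) (d : PySem.Dict String String) (k : String) :
    PySem.Dict.get? (sc.foldl (fun m s =>
      match PySem.List.pyGet? ((PySem.Str.split? s "/").getD []) (-1) with
      | none => m
      | some last =>
        match PySem.List.pyGet? ((PySem.Str.split? last "_").getD []) 1 with
        | none => m
        | some mid =>
          match PySem.List.pyGet? ((PySem.Str.split? mid ".").getD []) 0 with
          | none => m
          | some nm => PySem.Dict.insert m (PySem.Str.lower nm) s) d) k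
    = (((pvPairsOf sc).reverse.find? (fun p => p.1 == k)).map Prod.snd).or (PySem.Dict.get? d k) := by
  induction sc generalizing d with
  | nil => simp [pvPairsOf]
  | cons s t ih =>
    simp only [List.foldl_cons]
    have hpairs : pvPairsOf (s :: t)
        = (match pvShotKey? s with
           | none => pvPairsOf t
           | some n => (n, s) :: pvPairsOf t) := by
      cases h : pvShotKey? s <;> simp [pvPairsOf, h]
    rcases h1 : PySem.List.pyGet? ((PySem.Str.split? s "/").getD []) (-1) with _ | last
    · have hk : pvShotKey? s = none := by simp [pvShotKey?, h1]
      simp only [hpairs, hk]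
      exact ih d
    · rcases h2 : PySem.List.pyGet? ((PySem.Str.split? last "_").getD []) 1 with _ | mid
      · have hk : pvShotKey? s = none := by simp [pvShotKey?, h1, h2]
        simp only [hpairs, hk]
        rw [h2]
        exact ih d
      · rcases h3 : PySem.List.pyGet? ((PySem.Str.split? mid ".").getD []) 0 with _ | nm
        · have hk : pvShotKey? s = none := by simp [pvShotKey?, h1, h2, h3]
          simp only [hpairs, hk, h2, h3]
          exact ih d
        · have hk : pvShotKey? s = some (PySem.Str.lower nm) := by
            simp [pvShotKey?, h1, h2, h3]
          simp only [hpairs, hk, h2, h3]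
          rw [ih (d.insert (PySem.Str.lower nm) s)]
          rw [List.reverse_cons, List.find?_append]
          rcases hf : (pvPairsOf t).reverse.find? (fun p => p.1 == k) with _ | p
          · by_cases hnk : PySem.Str.lower nm = k
            · subst hnk; simp [hf, PySem.Dict.get?_insert_self]
            · have hb : (PySem.Str.lower nm == k) = false := beq_eq_false_iff_ne.mpr hnk
              simp [hf, List.find?, hb, PySem.Dict.get?_insert_of_ne d s (Ne.symm hnk)]
          · simp [hf]

-- every path a successful parse yields is never the sentinel "N/A"
theorem pv_found_ne (sc : List String) (k : String) (p : String × String)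
    (h : (pvPairsOf sc).reverse.find? (fun q => q.1 == k) = some p) : p.2 ≠ "N/A" := by
  have hmem : p ∈ (pvPairsOf sc).reverse := List.mem_of_find?_eq_some h
  rw [List.mem_reverse] at hmem
  rcases List.mem_filterMap.mp hmem with ⟨s, _, hs⟩
  rcases Option.map_eq_some_iff.mp hs with ⟨n, hn, hp⟩
  subst hp
  intro hNA
  simp only at hNA
  rw [hNA] at hn
  have hnone : pvShotKey? "N/A" = none := by rfl
  rw [hnone] at hn
  cases hn

-- mapping over a self-zip is a plain map
theorem pv_zip_map_self {α β γ : Type} (ns : List α) (g : α → β) (f : α × β → γ) :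
    ((ns.zip (ns.map g)).map f) = ns.map (fun n => f (n, g n)) := by
  induction ns with
  | nil => rfl
  | cons a t ih => simp [ih]

-- B's screenshots fold, started from cells `names.map g`, ends at the pointwise
-- "last matching screenshot wins" cells.
theorem pv_cells_fold (sc : List String) (names : List String) (g : String → String) :
    sc.foldl (fun cells shot =>
      match pvShotKey? shot with
      | none => cells
      | some key =>
        (names.zip cells).map (fun p =>
          if p.1 == key then "![Capture](" ++ shot ++ ")" else p.2)) (names.map g)
    = names.map (fun n =>
        match ((pvPairsOf sc).reverse.find? (fun p => p.1 == n)).map Prod.snd with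
        | none => g n
        | some path => "![Capture](" ++ path ++ ")") := by
  induction sc generalizing g with
  | nil => simp [pvPairsOf]
  | cons s t ih =>
    rcases hk : pvShotKey? s with _ | key
    · simp only [List.foldl_cons, hk]
      rw [ih g]
      have hpairs : pvPairsOf (s :: t) = pvPairsOf t := by simp [pvPairsOf, hk]
      rw [hpairs]
    · simp only [List.foldl_cons, hk]
      rw [pv_zip_map_self names g
        (fun p => if p.1 == key then "![Capture](" ++ s ++ ")" else p.2)]
      rw [ih (fun n => if n == key then "![Capture](" ++ s ++ ")" else g n)]
      have hpairs : pvPairsOf (s :: t) = (key, s) :: pvPairsOf t := by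
        simp [pvPairsOf, hk]
      rw [hpairs]
      apply List.map_congr_left
      intro n _
      rw [List.reverse_cons, List.find?_append]
      rcases hf : (pvPairsOf t).reverse.find? (fun p => p.1 == n) with _ | p
      · by_cases hkn : key = n
        · subst hkn; simp [hf]
        · have hb1 : (key == n) = false := beq_eq_false_iff_ne.mpr hkn
          have hb2 : (n == key) = false := beq_eq_false_iff_ne.mpr (Ne.symm hkn)
          simp [hf, List.find?, hb1, hb2]
      · simp [hf]

-- joining List Chars with the empty separator is flattening
theorem pv_intercalate_nil {α : Type} (l : List (List α)) :
    ([] : List α).intercalate l = l.flatten := by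
  induction l with
  | nil => simp [List.intercalate]
  | cons a t ih =>
    cases t with
    | nil => simp [List.intercalate]
    | cons b u => simp [List.intercalate, List.intersperse] at ih ⊢; simpa using ih

theorem pv_join_empty_nil : PySem.Str.join "" ([] : List String) = "" := by
  simp [PySem.Str.join, PySem.Chars.join, List.intercalate]

theorem pv_join_empty_cons (x : String) (xs : List String) :
    PySem.Str.join "" (x :: xs) = x ++ PySem.Str.join "" xs := by
  simp [PySem.Str.join, PySem.Chars.join, pv_intercalate_nil, String.ofList_append]

-- A's row-appending fold is the start string followed by the joined row list
theorem pv_foldl_join (l : List String) (f : String → String) (a : String) :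
    l.foldl (fun acc x => acc ++ f x) a = a ++ PySem.Str.join "" (l.map f) := by
  induction l generalizing a with
  | nil => simp [pv_join_empty_nil]
  | cons x t ih => simp [ih, pv_join_empty_cons, String.append_assoc]

-- the whole equivalence, stated over arbitrary services / screenshots lists
theorem pv_main_gen (services sc : List String) :
    (if services.isEmpty then
      (services.foldl (fun acc service =>
        let service_name := pvSvcName service
        let screenshot_path := PySem.Dict.getD (sc.foldl (fun m s =>
          match PySem.List.pyGet? ((PySem.Str.split? s "/").getD []) (-1) with
          | none => m
          | some last =>
            match PySem.List.pyGet? ((PySem.Str.split? last "_").getD []) 1 with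
            | none => m
            | some mid =>
              match PySem.List.pyGet? ((PySem.Str.split? mid ".").getD []) 0 with
              | none => m
              | some nm => PySem.Dict.insert m (PySem.Str.lower nm) s) (PySem.Dict.mk []))
          service_name "N/A"
        if screenshot_path ≠ "N/A" then
          acc ++ "| " ++ service_name ++ " | ![Capture](" ++ screenshot_path ++ ") |\n"
        else
          acc ++ "| " ++ service_name ++ " | Aucun screenshot disponible |\n")
        ("## Services détectés avec captures d'écran\n\n" ++ "| Service | Capture d'écran |\n" ++ "|---------|------------------|\n"))
        ++ "| Aucun service détecté | N/A |\n"
    else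
      services.foldl (fun acc service =>
        let service_name := pvSvcName service
        let screenshot_path := PySem.Dict.getD (sc.foldl (fun m s =>
          match PySem.List.pyGet? ((PySem.Str.split? s "/").getD []) (-1) with
          | none => m
          | some last =>
            match PySem.List.pyGet? ((PySem.Str.split? last "_").getD []) 1 with
            | none => m
            | some mid =>
              match PySem.List.pyGet? ((PySem.Str.split? mid ".").getD []) 0 with
              | none => m
              | some nm => PySem.Dict.insert m (PySem.Str.lower nm) s) (PySem.Dict.mk []))
          service_name "N/A"
        if screenshot_path ≠ "N/A" then
          acc ++ "| " ++ service_name ++ " | ![Capture](" ++ screenshot_path ++ ") |\n"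
        else
          acc ++ "| " ++ service_name ++ " | Aucun screenshot disponible |\n")
        ("## Services détectés avec captures d'écran\n\n" ++ "| Service | Capture d'écran |\n" ++ "|---------|------------------|\n"))
    = "## Services détectés avec captures d'écran\n\n" ++ "| Service | Capture d'écran |\n" ++ "|---------|------------------|\n" ++
      PySem.Str.join ""
        (if (((services.map pvSvcName).zip
              (sc.foldl (fun cells shot =>
                match pvShotKey? shot with
                | none => cells
                | some key =>
                  ((services.map pvSvcName).zip cells).map (fun p =>
                    if p.1 == key then "![Capture](" ++ shot ++ ")" else p.2))
                ((services.map pvSvcName).map (fun _ => "Aucun screenshot disponible")))).map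
              (fun p => "| " ++ p.1 ++ " | " ++ p.2 ++ " |\n")).isEmpty then
          ["| Aucun service détecté | N/A |\n"]
        else
          ((services.map pvSvcName).zip
              (sc.foldl (fun cells shot =>
                match pvShotKey? shot with
                | none => cells
                | some key =>
                  ((services.map pvSvcName).zip cells).map (fun p =>
                    if p.1 == key then "![Capture](" ++ shot ++ ")" else p.2))
                ((services.map pvSvcName).map (fun _ => "Aucun screenshot disponible")))).map
            (fun p => "| " ++ p.1 ++ " | " ++ p.2 ++ " |\n")) := by
  rw [pv_cells_fold sc (services.map pvSvcName) (fun _ => "Aucun screenshot disponible")]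
  rw [pv_zip_map_self (services.map pvSvcName)
        (fun n => match ((pvPairsOf sc).reverse.find? (fun p => p.1 == n)).map Prod.snd with
          | none => "Aucun screenshot disponible"
          | some path => "![Capture](" ++ path ++ ")")
        (fun p => "| " ++ p.1 ++ " | " ++ p.2 ++ " |\n")]
  rw [List.map_map]
  have hrow : ∀ acc service, (
      let service_name := pvSvcName service
      let screenshot_path := PySem.Dict.getD (sc.foldl (fun m s =>
        match PySem.List.pyGet? ((PySem.Str.split? s "/").getD []) (-1) with
        | none => m
        | some last =>
          match PySem.List.pyGet? ((PySem.Str.split? last "_").getD []) 1 with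
          | none => m
          | some mid =>
            match PySem.List.pyGet? ((PySem.Str.split? mid ".").getD []) 0 with
            | none => m
            | some nm => PySem.Dict.insert m (PySem.Str.lower nm) s) (PySem.Dict.mk []))
        service_name "N/A"
      if screenshot_path ≠ "N/A" then
        acc ++ "| " ++ service_name ++ " | ![Capture](" ++ screenshot_path ++ ") |\n"
      else
        acc ++ "| " ++ service_name ++ " | Aucun screenshot disponible |\n")
      = acc ++ ("| " ++ pvSvcName service ++ " | " ++ pvCell sc (pvSvcName service) ++ " |\n") := by
    intro acc service
    dsimp only
    rw [PySem.Dict.getD_eq_get?_getD, pv_get_fold sc (PySem.Dict.mk []) (pvSvcName service)]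
    rw [show PySem.Dict.get? (PySem.Dict.mk ([] : List (String × String)))
          (pvSvcName service) = none from rfl, Option.or_none]
    simp only [pvCell]
    rcases hf : (pvPairsOf sc).reverse.find? (fun p => p.1 == pvSvcName service) with _ | p
    · simp [hf, String.append_assoc]
    · have hne : p.2 ≠ "N/A" := pv_found_ne _ _ _ hf
      simp only [hf, Option.map_some, Option.getD_some, ne_eq, hne, not_false_eq_true,
        if_true, String.append_assoc]
      rw [show (" | ![Capture](" : String) = " | " ++ "![Capture](" from rfl,
        String.append_assoc, show (((")" : String) ++ " |\n") = ") |\n") from rfl]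
  have hfold : ∀ a, services.foldl (fun acc service =>
      let service_name := pvSvcName service
      let screenshot_path := PySem.Dict.getD (sc.foldl (fun m s =>
        match PySem.List.pyGet? ((PySem.Str.split? s "/").getD []) (-1) with
        | none => m
        | some last =>
          match PySem.List.pyGet? ((PySem.Str.split? last "_").getD []) 1 with
          | none => m
          | some mid =>
            match PySem.List.pyGet? ((PySem.Str.split? mid ".").getD []) 0 with
            | none => m
            | some nm => PySem.Dict.insert m (PySem.Str.lower nm) s) (PySem.Dict.mk []))
        service_name "N/A"
      if screenshot_path ≠ "N/A" then
        acc ++ "| " ++ service_name ++ " | ![Capture](" ++ screenshot_path ++ ") |\n"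
      else
        acc ++ "| " ++ service_name ++ " | Aucun screenshot disponible |\n") a
    = a ++ PySem.Str.join "" (services.map (fun service =>
        "| " ++ pvSvcName service ++ " | " ++ pvCell sc (pvSvcName service) ++ " |\n")) := by
    intro a
    rw [← pv_foldl_join services
      (fun service => "| " ++ pvSvcName service ++ " | " ++ pvCell sc (pvSvcName service) ++ " |\n")]
    apply List.foldl_ext
    intro acc service _
    exact hrow acc service
  cases services with
  | nil =>
    simp [pv_join_empty_cons, pv_join_empty_nil]
  | cons s0 rest =>
    rw [hfold]
    rfl

theorem pv_main (entry : List (String × List String)) :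
    generate_annex entry = generate_annex_alt entry := by
  unfold generate_annex generate_annex_alt
  exact pv_main_gen ((PySem.Dict.mk entry).getD "merged_services" ([] : List String))
    ((PySem.Dict.mk entry).getD "img" ([] : List String))

-- ===== VERDICT (by name: the statement is the Claim_ definition above) =====
theorem generate_annex_spec : Claim_equal_generate_annex := by
  intro entry _ _
  unfold Spec_generate_annex
  exact pv_main entry
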